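-- pv_equiv track=rewrite | github.com/escheong/tests2022 | boostcamp/1.py | solution
-- ===== SOURCE A (Python) =====
-- def solution(month, date, weeks):
--     date_by_month = [0, 31, 28, 31, 30, 31, 30, 31, 31, 30, 31, 30, 31]
--     total = date
--     for i in range(month):
--         total += date_by_month[i]
--
--     day = total % 7 if total % 7 != 0 else 7   # 요일
--     start_month = month if date - day >= 0 else month - 1
--     if month == start_month:
--         start_date = date - day + 1
--     else:
--         start_date = date_by_month[start_month] - (day - date) + 1
--
--     answer = [[] for _ in range(weeks)]
--     for i in range(weeks):
--         if start_month > 12: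
--             break
--         for j in range(7):
--             if start_date <= date_by_month[start_month]:
--                 if i == 0 and j == 0:
--                     answer[i].append(str(start_month) + "/" + str(start_date))
--                 else:
--                     answer[i].append(str(start_date))
--
--             else:
--                 start_month += 1
--                 start_date = 1
--                 if start_month > 12:
--                     break
--                 answer[i].append(str(start_month) + "/" + str(start_date))
--
--             start_date += 1
--
--     return list(filter(None, answer))
-- ===== SOURCE B (Python) =====
-- def solution(month, date, weeks):
--     date_by_month = [0, 31, 28, 31, 30, 31, 30, 31, 31, 30, 31, 30, 31]
--     total = date + sum(date_by_month[:max(month, 0)])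
--     day = total % 7 if total % 7 != 0 else 7
--     if date - day >= 0:
--         sm, sd = month, date - day + 1
--     else:
--         sm, sd = month - 1, date_by_month[month - 1] - (day - date) + 1
--     n = 7 * max(weeks, 0)
--     # month-at-a-time: each month contributes one run of labels (no day-by-day loop),
--     # capped at the number of cells still needed
--     if n > 0 and sm <= 12 and sd <= date_by_month[sm]:
--         labels = [str(sm) + "/" + str(sd)] + [str(d) for d in range(sd + 1, min(date_by_month[sm], sd + n - 1) + 1)]
--     else:
--         labels = []
--     m = sm + 1
--     while m <= 12 and len(labels) < n:
--         labels += [str(m) + "/" + str(1)] + [str(d) for d in range(2, min(date_by_month[m], n - len(labels)) + 1)]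
--         m += 1
--     out = []
--     while labels:
--         out.append(labels[:7])
--         labels = labels[7:]
--     return out
-- ===== Notes on version B (the rewrite author's own statement) =====
-- stated objective: alternative
-- what changed: B drops A's day-by-day state machine that fills a preallocated list of week slots (7*weeks iterations plus filter(None)): it emits one whole range-built run of labels per month (at most 13 month iterations), capped at the cells still needed, then chunks the flat list into weeks of 7.
import Mathlib
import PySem

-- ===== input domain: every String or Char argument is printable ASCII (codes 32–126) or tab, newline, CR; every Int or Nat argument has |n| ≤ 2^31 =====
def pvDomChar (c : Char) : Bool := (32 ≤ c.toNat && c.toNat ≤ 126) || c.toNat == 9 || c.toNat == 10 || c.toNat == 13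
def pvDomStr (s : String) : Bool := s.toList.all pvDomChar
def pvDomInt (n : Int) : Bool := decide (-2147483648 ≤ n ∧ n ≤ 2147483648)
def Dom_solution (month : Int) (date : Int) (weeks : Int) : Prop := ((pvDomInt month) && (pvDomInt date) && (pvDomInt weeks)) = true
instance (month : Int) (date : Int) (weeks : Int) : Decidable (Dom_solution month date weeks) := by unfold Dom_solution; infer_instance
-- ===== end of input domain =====

-- B replaces A's day-by-day state machine over a preallocated week array (plus filter(None))
-- by month-at-a-time run generation: each month contributes one range-built run of labels,
-- capped at the cells still needed, and the flat list is chunked into weeks; objective: simpler.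

-- ===== PORT A =====
def pvDbm : List Int := [0, 31, 28, 31, 30, 31, 30, 31, 31, 30, 31, 30, 31]

-- inner 'for j in range(7)' body; brk models Python's inner 'break' (skip remaining iterations)
def pvInnerBody (i : Nat) (s : List (List String) × Int × Int × Bool) (j : Nat) :
    List (List String) × Int × Int × Bool :=
  match s with
  | (ans, sm, sd, brk) =>
    if brk then (ans, sm, sd, brk)
    else if sd ≤ PySem.List.pyGetD pvDbm sm 0 then
      let lbl := if i = 0 ∧ j = 0 then PySem.Int.toStr sm ++ "/" ++ PySem.Int.toStr sd
                 else PySem.Int.toStr sd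
      (ans.set i (ans.getD i [] ++ [lbl]), sm, sd + 1, false)
    else
      let sm' := sm + 1
      if sm' > 12 then (ans, sm', 1, true)    -- start_date = 1, then break
      else (ans.set i (ans.getD i [] ++ [PySem.Int.toStr sm' ++ "/" ++ PySem.Int.toStr 1]),
            sm', 1 + 1, false)                -- start_date = 1, append, start_date += 1

-- outer 'for i in range(weeks)' body; once start_month > 12 every later week is skipped,
-- which is exactly Python's 'break' here since start_month never decreases
def pvOuterBody (s : List (List String) × Int × Int) (i : Nat) :
    List (List String) × Int × Int :=
  match s with
  | (ans, sm, sd) =>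
    if sm > 12 then (ans, sm, sd)
    else
      let r := (List.range 7).foldl (pvInnerBody i) (ans, sm, sd, false)
      (r.1, r.2.1, r.2.2.1)

def solution (month : Int) (date : Int) (weeks : Int) : List (List String) :=
  let total := (PySem.List.pyRange 0 month 1).foldl
      (fun t i => t + PySem.List.pyGetD pvDbm i 0) date
  let day := if PySem.Int.mod total 7 ≠ 0 then PySem.Int.mod total 7 else 7
  let startMonth := if date - day ≥ 0 then month else month - 1
  let startDate := if month = startMonth then date - day + 1
                   else PySem.List.pyGetD pvDbm startMonth 0 - (day - date) + 1
  let res := (List.range weeks.toNat).foldl pvOuterBody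
      (List.replicate weeks.toNat [], startMonth, startDate)
  res.1.filter (fun w => decide (w ≠ []))

-- ===== PORT B =====
-- 'while m <= 12 and len(labels) < n' month loop; one capped run of labels per month;
-- fuel = number of months left before 13, checked below to dominate the loop condition
def pvMonthLoopB (fuel : Nat) (m n : Int) (labels : List String) : List String :=
  match fuel with
  | 0 => labels
  | f + 1 =>
    if m ≤ 12 ∧ (labels.length : Int) < n then
      pvMonthLoopB f (m + 1) n
        (labels ++ (PySem.Int.toStr m ++ "/" ++ PySem.Int.toStr 1)
          :: (PySem.List.pyRange 2 (min (PySem.List.pyGetD pvDbm m 0) (n - labels.length) + 1) 1).map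
              PySem.Int.toStr)
    else labels

-- 'while labels: out.append(labels[:7]); labels = labels[7:]' — these slices are exactly
-- take/drop (PySem.List.slice_to_natCast / slice_from_natCast)
def pvChunk7 (l : List String) : List (List String) :=
  match l with
  | [] => []
  | x :: xs => ((x :: xs).take 7) :: pvChunk7 ((x :: xs).drop 7)
termination_by l.length
decreasing_by simp

def solution_alt (month : Int) (date : Int) (weeks : Int) : List (List String) :=
  let total := date + (PySem.List.slice pvDbm none (some (max month 0))).sum
  let day := if PySem.Int.mod total 7 ≠ 0 then PySem.Int.mod total 7 else 7
  let md := if date - day ≥ 0 then (month, date - day + 1)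
            else (month - 1, PySem.List.pyGetD pvDbm (month - 1) 0 - (day - date) + 1)
  let n := 7 * max weeks 0
  let labels0 :=
    if 0 < n ∧ md.1 ≤ 12 ∧ md.2 ≤ PySem.List.pyGetD pvDbm md.1 0 then
      (PySem.Int.toStr md.1 ++ "/" ++ PySem.Int.toStr md.2)
        :: (PySem.List.pyRange (md.2 + 1)
              (min (PySem.List.pyGetD pvDbm md.1 0) (md.2 + n - 1) + 1) 1).map PySem.Int.toStr
    else []
  pvChunk7 (pvMonthLoopB (12 - md.1).toNat (md.1 + 1) n labels0)

-- ===== PRECONDITION & SPEC =====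
-- cumulative day counts: pvCum[m] = sum of pvDbm[0..m-1] for m = 1..13
def pvCum : List Int := [0, 0, 31, 59, 90, 120, 151, 181, 212, 243, 273, 304, 334, 365]

-- Pre_ excludes exactly the inputs where Python A raises IndexError: month ≥ 14 (prologue sum),
-- or a month rolled back below index -13, or a walk started at month ≤ -14 (negative indices
-- down to -13 wrap silently in Python and both programs reproduce that wrap).
def Pre_solution (month : Int) (date : Int) (weeks : Int) : Prop :=
  month ≤ 13 ∧
  (let total := date + (if 1 ≤ month then PySem.List.pyGetD pvCum month 0 else 0)
   let day := (total - 1).emod 7 + 1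
   if date - day < 0 then -12 ≤ month else (-13 ≤ month ∨ weeks ≤ 0))
instance (month : Int) (date : Int) (weeks : Int) : Decidable (Pre_solution month date weeks) := by
  unfold Pre_solution; infer_instance

def pvWitness_solution : Int × Int × Int := (7, 14, 3)

def Spec_solution (month : Int) (date : Int) (weeks : Int) (out : List (List String)) : Prop := out = solution_alt month date weeks
instance (month : Int) (date : Int) (weeks : Int) (out : List (List String)) : Decidable (Spec_solution month date weeks out) := by unfold Spec_solution; infer_instance

-- ===== CLAIM (what is proved, stated in full; the proofs are below) =====
def Claim_equal_solution : Prop := ∀ (month : Int) (date : Int) (weeks : Int), Dom_solution month date weeks → Pre_solution month date weeks → Spec_solution month date weeks (solution month date weeks)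

-- ===== LEMMAS AND PROOFS =====

-- canonical one-week walk: labels emitted, final month/date, break flag
def pvWalk (t : Nat) (m d : Int) (f : Bool) : List String × Int × Int × Bool :=
  match t with
  | 0 => ([], m, d, false)
  | t + 1 =>
    if d ≤ PySem.List.pyGetD pvDbm m 0 then
      let r := pvWalk t m (d + 1) false
      ((if f then PySem.Int.toStr m ++ "/" ++ PySem.Int.toStr d else PySem.Int.toStr d) :: r.1,
       r.2)
    else if m + 1 > 12 then ([], m + 1, 1, true)
    else
      let r := pvWalk t (m + 1) 2 false
      ((PySem.Int.toStr (m + 1) ++ "/" ++ PySem.Int.toStr 1) :: r.1, r.2)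

-- ghost flat day-by-day stream truncated at k cells (A's cells, week structure forgotten)
def pvEmit (k : Nat) (m d : Int) (f : Bool) : List String :=
  match k with
  | 0 => []
  | k + 1 =>
    if 12 < m then []
    else if d ≤ PySem.List.pyGetD pvDbm m 0 then
      (if f then PySem.Int.toStr m ++ "/" ++ PySem.Int.toStr d else PySem.Int.toStr d)
        :: pvEmit k m (d + 1) false
    else if 12 < m + 1 then []
    else (PySem.Int.toStr (m + 1) ++ "/" ++ PySem.Int.toStr 1) :: pvEmit k (m + 1) 2 false

theorem pvEmit_gt12 (n : Nat) (m d : Int) (f : Bool) (h : 12 < m) : pvEmit n m d f = [] := by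
  cases n with
  | zero => rfl
  | succ n => simp [pvEmit, h]

theorem pvWalk_props (t : Nat) : ∀ (m d : Int) (f : Bool), m ≤ 12 →
    ((pvWalk t m d f).2.2.2 = true → (pvWalk t m d f).2.1 = 13) ∧
    ((pvWalk t m d f).2.2.2 = false → (pvWalk t m d f).2.1 ≤ 12 ∧ (pvWalk t m d f).1.length = t) ∧
    (pvWalk t m d f).1.length ≤ t := by
  induction t with
  | zero => intro m d f hm; simp [pvWalk, hm]
  | succ t ih =>
    intro m d f hm
    simp only [pvWalk]
    split
    · have := ih m (d + 1) false hm
      simp only [List.length_cons]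
      exact ⟨this.1, fun h => ⟨(this.2.1 h).1, by rw [(this.2.1 h).2]⟩, by omega⟩
    · split
      · next h2 => simp; omega
      · next h2 =>
        have hm' : m + 1 ≤ 12 := by omega
        have := ih (m + 1) 2 false hm'
        simp only [List.length_cons]
        exact ⟨this.1, fun h => ⟨(this.2.1 h).1, by rw [(this.2.1 h).2]⟩, by omega⟩

theorem pvEmit_walk (t : Nat) : ∀ (n : Nat) (m d : Int) (f : Bool), m ≤ 12 →
    (f = true → 1 ≤ t) →
    pvEmit (t + n) m d f =
      (pvWalk t m d f).1 ++ pvEmit n (pvWalk t m d f).2.1 (pvWalk t m d f).2.2.1 false := by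
  induction t with
  | zero =>
    intro n m d f hm hf
    cases f with
    | false => simp [pvWalk]
    | true => exact absurd (hf rfl) (by omega)
  | succ t ih =>
    intro n m d f hm hf
    have : t + 1 + n = (t + n) + 1 := by omega
    rw [this]
    simp only [pvEmit, pvWalk]
    rw [if_neg (by omega)]
    split
    · next hd =>
      rw [ih n m (d + 1) false hm (by simp)]
      simp
    · split
      · next h2 => simp [pvEmit_gt12 _ _ _ _ (by omega : (12:Int) < m + 1)]
      · next h2 =>
        rw [ih n (m + 1) 2 false (by omega) (by simp)]
        simp

theorem pvInner_frozen (i : Nat) (js : List Nat) (ans : List (List String)) (m d : Int) :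
    js.foldl (pvInnerBody i) (ans, m, d, true) = (ans, m, d, true) := by
  induction js with
  | nil => rfl
  | cons j js ih => simp only [List.foldl_cons, pvInnerBody]; exact ih

theorem pvInner_walk (t : Nat) : ∀ (j0 : Nat) (P R : List (List String)) (x : List String)
    (m d : Int),
    (List.range' j0 t).foldl (pvInnerBody P.length) (P ++ x :: R, m, d, false)
      = (P ++ (x ++ (pvWalk t m d (decide (P.length = 0 ∧ j0 = 0))).1) :: R,
         (pvWalk t m d (decide (P.length = 0 ∧ j0 = 0))).2.1,
         (pvWalk t m d (decide (P.length = 0 ∧ j0 = 0))).2.2.1,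
         (pvWalk t m d (decide (P.length = 0 ∧ j0 = 0))).2.2.2) := by
  induction t with
  | zero => intro j0 P R x m d; simp [pvWalk]
  | succ t ih =>
    intro j0 P R x m d
    rw [List.range'_succ, List.foldl_cons]
    simp only [pvInnerBody, Bool.false_eq_true, if_false]
    by_cases hd : d ≤ PySem.List.pyGetD pvDbm m 0
    · rw [if_pos hd]
      have hgd : (P ++ x :: R).getD P.length [] = x := by simp [List.getD]
      have hset : ∀ y, (P ++ x :: R).set P.length y = P ++ y :: R := by intro y; simp
      rw [hgd, hset]
      rw [ih (j0 + 1) P R _ m (d + 1)]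
      have hf2 : decide (P.length = 0 ∧ j0 + 1 = 0) = false := by simp
      rw [hf2]
      simp only [pvWalk, if_pos hd]
      by_cases hij : P.length = 0 ∧ j0 = 0
      · simp [hij]
      · simp only [if_neg hij]
        simp
        intro hP hj
        exact absurd ⟨by simp [hP], hj⟩ hij
    · rw [if_neg hd]
      simp only [pvWalk, if_neg hd]
      by_cases h2 : m + 1 > 12
      · rw [if_pos h2, if_pos h2, pvInner_frozen]
        simp
      · rw [if_neg h2, if_neg h2]
        have hgd : (P ++ x :: R).getD P.length [] = x := by simp [List.getD]
        have hset : ∀ y, (P ++ x :: R).set P.length y = P ++ y :: R := by intro y; simp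
        rw [hgd, hset, show (1 : Int) + 1 = 2 from rfl]
        rw [ih (j0 + 1) P R _ (m + 1) 2]
        have hf2 : decide (P.length = 0 ∧ j0 + 1 = 0) = false := by simp
        rw [hf2]
        simp

theorem pvChunk7_cons7 (w r : List String) (h : w.length = 7) :
    pvChunk7 (w ++ r) = w :: pvChunk7 r := by
  match w, h with
  | x :: xs, h =>
    show pvChunk7 (x :: (xs ++ r)) = _
    have h1 : (x :: (xs ++ r)).take 7 = x :: xs := by
      rw [show x :: (xs ++ r) = (x :: xs) ++ r from rfl,
        List.take_append_of_le_length (by omega), List.take_of_length_le (by omega)]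
    have h2 : (x :: (xs ++ r)).drop 7 = r := by
      rw [show x :: (xs ++ r) = (x :: xs) ++ r from rfl, List.drop_left' h]
    simp only [pvChunk7, h1, h2]

theorem pvChunk7_nil : pvChunk7 [] = [] := by simp [pvChunk7]

theorem pvChunk7_small (l : List String) (h : l.length ≤ 7) :
    pvChunk7 l = if l = [] then [] else [l] := by
  cases l with
  | nil => simp [pvChunk7]
  | cons x xs =>
    have h1 : (x :: xs).take 7 = x :: xs := List.take_of_length_le h
    have h2 : (x :: xs).drop 7 = [] := List.drop_eq_nil_of_le h
    simp only [pvChunk7, h1, h2]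
    simp

theorem pvOuter_spec (k : Nat) : ∀ (s : Nat) (P : List (List String)) (m d : Int),
    s = P.length →
    (((List.range' s k).foldl pvOuterBody
        (P ++ List.replicate k ([] : List String), m, d)).1).filter
        (fun w => decide (w ≠ []))
      = P.filter (fun w => decide (w ≠ []))
          ++ pvChunk7 (pvEmit (7 * k) m d (decide (s = 0))) := by
  induction k with
  | zero =>
    intro s P m d hs
    simp [pvChunk7, pvEmit]
  | succ k ih =>
    intro s P m d hs
    subst hs
    rw [List.range'_succ, List.foldl_cons]
    by_cases hm : (12 : Int) < m
    · -- week skipped; every later week is skipped too, and the stream is empty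
      simp only [pvOuterBody, if_pos hm]
      have hrep : P ++ List.replicate (k + 1) ([] : List String)
          = (P ++ [[]]) ++ List.replicate k ([] : List String) := by
        simp [List.replicate_succ]
      rw [hrep, ih (P.length + 1) (P ++ [[]]) m d (by simp)]
      rw [pvEmit_gt12 _ _ _ _ hm, pvEmit_gt12 _ _ _ _ hm]
      simp
    · have hm' : m ≤ 12 := by omega
      simp only [pvOuterBody, if_neg hm]
      have hrep : P ++ List.replicate (k + 1) ([] : List String)
          = P ++ ([] : List String) :: List.replicate k ([] : List String) := by
        simp [List.replicate_succ]
      rw [hrep, List.range_eq_range', pvInner_walk 7 0 P _ [] m d]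
      have hf : decide (P.length = 0 ∧ 0 = 0) = decide (P.length = 0) := by simp
      rw [hf]
      set W := pvWalk 7 m d (decide (P.length = 0)) with hW
      have hprops := pvWalk_props 7 m d (decide (P.length = 0)) hm'
      have hsplit : P ++ (([] : List String) ++ W.1) :: List.replicate k ([] : List String)
          = (P ++ [W.1]) ++ List.replicate k ([] : List String) := by simp
      dsimp only
      rw [hsplit, ih (P.length + 1) (P ++ [W.1]) W.2.1 W.2.2.1 (by simp)]
      have hemit : pvEmit (7 * (k + 1)) m d (decide (P.length = 0))
          = W.1 ++ pvEmit (7 * k) W.2.1 W.2.2.1 false := by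
        rw [show 7 * (k + 1) = 7 + 7 * k from by omega]
        exact pvEmit_walk 7 (7 * k) m d _ hm' (fun _ => by omega)
      rw [hemit]
      have hs1 : decide (P.length + 1 = 0) = false := by simp
      rw [hs1]
      cases hb : W.2.2.2 with
      | false =>
        have hlen : W.1.length = 7 := ((hprops.2.1 hb).2)
        rw [pvChunk7_cons7 _ _ hlen]
        have hne : W.1 ≠ [] := by intro hnil; rw [hnil] at hlen; simp at hlen
        simp [List.filter_append, hne]
      | true =>
        have hm13 : W.2.1 = 13 := hprops.1 hb
        rw [hm13, pvEmit_gt12 _ _ _ _ (by omega)]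
        rw [List.append_nil, pvChunk7_small _ hprops.2.2]
        by_cases hnil : W.1 = []
        · rw [hnil, if_pos rfl, List.filter_append, pvChunk7_nil, List.append_nil]
          simp
        · rw [if_neg hnil, List.filter_append, pvChunk7_nil, List.append_nil]
          have hf1 : List.filter (fun w => decide (w ≠ [])) [W.1] = [W.1] := by simp [hnil]
          rw [hf1]

-- ======== B-side lemmas: month-run loop = take of the full month stream ========

-- untruncated tail stream: all cells of months m..12, one run per month
def pvTailG (fuel : Nat) (m : Int) : List String :=
  match fuel with
  | 0 => []
  | f + 1 =>
    if 12 < m then []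
    else ((PySem.Int.toStr m ++ "/" ++ PySem.Int.toStr 1)
            :: (PySem.List.pyRange 2 (PySem.List.pyGetD pvDbm m 0 + 1) 1).map PySem.Int.toStr)
          ++ pvTailG f (m + 1)

-- untruncated cells of the current month from date d
def pvCells (m d : Int) (f : Bool) : List String :=
  if d ≤ PySem.List.pyGetD pvDbm m 0 then
    (if f then PySem.Int.toStr m ++ "/" ++ PySem.Int.toStr d else PySem.Int.toStr d)
      :: (PySem.List.pyRange (d + 1) (PySem.List.pyGetD pvDbm m 0 + 1) 1).map PySem.Int.toStr
  else []

theorem pvTailG_gt12 (fuel : Nat) (m : Int) (h : 12 < m) : pvTailG fuel m = [] := by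
  cases fuel with
  | zero => rfl
  | succ f => simp [pvTailG, h]

theorem pvCells_false (m d : Int) :
    pvCells m d false = (PySem.List.pyRange d (PySem.List.pyGetD pvDbm m 0 + 1) 1).map
      PySem.Int.toStr := by
  unfold pvCells
  by_cases hd : d ≤ PySem.List.pyGetD pvDbm m 0
  · rw [if_pos hd]
    conv_rhs => rw [PySem.List.pyRange_one_cons
      (show d < PySem.List.pyGetD pvDbm m 0 + 1 by omega)]
    rw [List.map_cons]
    simp
  · rw [if_neg hd, PySem.List.pyRange_one_eq_nil
      (show PySem.List.pyGetD pvDbm m 0 + 1 ≤ d by omega), List.map_nil]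

theorem pvTake_pyRange (k : Nat) : ∀ (a b : Int),
    (PySem.List.pyRange a b 1).take k = PySem.List.pyRange a (min b (a + k)) 1 := by
  induction k with
  | zero =>
    intro a b
    rw [List.take_zero, PySem.List.pyRange_one_eq_nil
      (show min b (a + ((0 : Nat) : Int)) ≤ a by push_cast; omega)]
  | succ k ih =>
    intro a b
    by_cases hab : a < b
    · conv_lhs => rw [PySem.List.pyRange_one_cons hab]
      rw [List.take_succ_cons, ih]
      conv_rhs => rw [PySem.List.pyRange_one_cons
        (show a < min b (a + ((k + 1 : Nat) : Int)) by push_cast; omega)]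
      have : min b (a + 1 + (k : Int)) = min b (a + ((k + 1 : Nat) : Int)) := by
        push_cast; omega
      rw [this]
    · rw [PySem.List.pyRange_one_eq_nil (show b ≤ a by omega),
        PySem.List.pyRange_one_eq_nil
          (show min b (a + ((k + 1 : Nat) : Int)) ≤ a by push_cast; omega), List.take_nil]

-- the ghost day stream is the take of the month-run stream
theorem pvEmit_take (k : Nat) : ∀ (fuel : Nat) (m d : Int) (f : Bool), m ≤ 12 →
    (12 - m).toNat ≤ fuel →
    pvEmit k m d f = (pvCells m d f ++ pvTailG fuel (m + 1)).take k := by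
  induction k with
  | zero => intro fuel m d f hm hf; simp [pvEmit]
  | succ k ih =>
    intro fuel m d f hm hf
    simp only [pvEmit]
    rw [if_neg (by omega)]
    by_cases hd : d ≤ PySem.List.pyGetD pvDbm m 0
    · rw [if_pos hd]
      unfold pvCells
      rw [if_pos hd]
      rw [ih fuel m (d + 1) false hm hf]
      rw [pvCells_false]
      simp
    · rw [if_neg hd]
      unfold pvCells
      rw [if_neg hd, List.nil_append]
      by_cases h13 : 12 < m + 1
      · rw [if_pos h13, pvTailG_gt12 _ _ h13]
        simp
      · rw [if_neg h13]
        have hm1 : m + 1 ≤ 12 := by omega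
        obtain ⟨f', rfl⟩ : ∃ f', fuel = f' + 1 := ⟨fuel - 1, by omega⟩
        simp only [pvTailG]
        rw [if_neg (by omega)]
        rw [ih f' (m + 1) 2 false hm1 (by omega), pvCells_false]
        simp

-- take j (l.take j ++ t) = take j (l ++ t)
theorem pvTake_take_append {α : Type} (l t : List α) (j : Nat) :
    ((l.take j) ++ t).take j = (l ++ t).take j := by
  rw [List.take_append, List.take_append, List.take_take]
  congr 2
  · omega
  · simp [List.length_take]; omega

-- the month loop computes the n-truncation of acc ++ tail stream
theorem pvLoop_take (fuel : Nat) : ∀ (m n : Int) (acc : List String), 0 ≤ n →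
    (acc.length : Int) ≤ n →
    pvMonthLoopB fuel m n acc = (acc ++ pvTailG fuel m).take n.toNat := by
  induction fuel with
  | zero =>
    intro m n acc hn hlen
    simp only [pvMonthLoopB, pvTailG, List.append_nil]
    rw [List.take_of_length_le (by omega)]
  | succ f ih =>
    intro m n acc hn hlen
    simp only [pvMonthLoopB]
    by_cases hc : m ≤ 12 ∧ (acc.length : Int) < n
    · rw [if_pos hc]
      simp only [pvTailG]
      rw [if_neg (by omega)]
      set g := PySem.List.pyGetD pvDbm m 0 with hg
      set need := n - acc.length with hneed
      have hneed1 : 1 ≤ need := by omega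
      -- capped run = full run truncated at `need` cells
      have hcap :
          (PySem.Int.toStr m ++ "/" ++ PySem.Int.toStr 1)
            :: (PySem.List.pyRange 2 (min g need + 1) 1).map PySem.Int.toStr
          = ((PySem.Int.toStr m ++ "/" ++ PySem.Int.toStr 1)
              :: (PySem.List.pyRange 2 (g + 1) 1).map PySem.Int.toStr).take need.toNat := by
        obtain ⟨j, hj⟩ : ∃ j : Nat, need.toNat = j + 1 := ⟨need.toNat - 1, by omega⟩
        rw [hj, List.take_succ_cons, ← List.map_take, pvTake_pyRange]
        have : min (g + 1) (2 + (j : Int)) = min g need + 1 := by omega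
        rw [this]
      set fullRun := (PySem.Int.toStr m ++ "/" ++ PySem.Int.toStr 1)
            :: (PySem.List.pyRange 2 (g + 1) 1).map PySem.Int.toStr with hfull
      have hcaplen : ((fullRun.take need.toNat).length : Int) ≤ need := by
        simp [List.length_take]; omega
      rw [hcap, ih (m + 1) n (acc ++ fullRun.take need.toNat) hn (by
        simp only [List.length_append, List.length_take]; omega)]
      have hN : n.toNat = acc.length + need.toNat := by omega
      rw [hN, List.append_assoc]
      conv_lhs => rw [List.take_append]
      conv_rhs => rw [List.take_append]
      congr 1
      have hsub : acc.length + need.toNat - acc.length = need.toNat := by omega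
      rw [hsub, pvTake_take_append]
    · rw [if_neg hc]
      rcases not_and_or.mp hc with hm | hlt
      · rw [pvTailG_gt12 _ _ (by omega), List.append_nil,
          List.take_of_length_le (by omega)]
      · have : (acc.length : Int) = n := by omega
        rw [List.take_append_of_le_length (by omega), List.take_of_length_le (by omega)]

-- the two prologues compute the same total (within Pre_: month ≤ 13)
theorem pvTotal_eq (month date : Int) (hm : month ≤ 13) :
    (PySem.List.pyRange 0 month 1).foldl (fun t i => t + PySem.List.pyGetD pvDbm i 0) date
      = date + (PySem.List.slice pvDbm none (some (max month 0))).sum := by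
  have hsl : PySem.List.slice pvDbm none (some (max month 0))
      = pvDbm.take (max month 0).toNat := by
    apply PySem.List.slice_to
    omega
  rw [PySem.List.foldl_add, hsl]
  congr 1
  by_cases h0 : month ≤ 0
  · rw [PySem.List.pyRange_one_eq_nil (by omega),
      show (max month 0).toNat = 0 from by omega]
    simp
  · have h1 : 1 ≤ month := by omega
    interval_cases month <;> decide

-- main equality under Pre_
theorem pv_main (month date weeks : Int) (hp : Pre_solution month date weeks) :
    solution month date weeks = solution_alt month date weeks := by
  obtain ⟨hm13, -⟩ := hp
  have key : ∀ (sm sd : Int),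
      (((List.range weeks.toNat).foldl pvOuterBody
          (List.replicate weeks.toNat [], sm, sd)).1).filter (fun w => decide (w ≠ []))
        = pvChunk7 (pvMonthLoopB (12 - sm).toNat (sm + 1) (7 * max weeks 0)
            (if 0 < 7 * max weeks 0 ∧ sm ≤ 12 ∧ sd ≤ PySem.List.pyGetD pvDbm sm 0 then
              (PySem.Int.toStr sm ++ "/" ++ PySem.Int.toStr sd)
                :: (PySem.List.pyRange (sd + 1)
                    (min (PySem.List.pyGetD pvDbm sm 0) (sd + 7 * max weeks 0 - 1) + 1) 1).map
                    PySem.Int.toStr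
            else [])) := by
    intro sm sd
    set n := 7 * max weeks 0 with hn
    have hn0 : 0 ≤ n := by omega
    -- A side: filtered week array = chunk7 of the day stream
    have hA := pvOuter_spec weeks.toNat 0 [] sm sd rfl
    simp only [List.nil_append, List.filter_nil] at hA
    rw [List.range_eq_range']
    have hNn : 7 * weeks.toNat = n.toNat := by omega
    simp only [hNn] at hA
    simp only [decide_true] at hA
    rw [hA]
    -- B side: month loop = take of stream = day stream
    congr 1
    by_cases hsm : sm ≤ 12
    · have hL := pvLoop_take (12 - sm).toNat (sm + 1) n
        (if 0 < n ∧ sm ≤ 12 ∧ sd ≤ PySem.List.pyGetD pvDbm sm 0 then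
          (PySem.Int.toStr sm ++ "/" ++ PySem.Int.toStr sd)
            :: (PySem.List.pyRange (sd + 1)
                (min (PySem.List.pyGetD pvDbm sm 0) (sd + n - 1) + 1) 1).map PySem.Int.toStr
        else []) hn0
      by_cases hn1 : 0 < n
      · by_cases hsd : sd ≤ PySem.List.pyGetD pvDbm sm 0
        · rw [if_pos ⟨hn1, hsm, hsd⟩] at hL ⊢
          -- the guarded first run is pvCells.take n
          have hcap : (PySem.Int.toStr sm ++ "/" ++ PySem.Int.toStr sd)
                :: (PySem.List.pyRange (sd + 1)
                    (min (PySem.List.pyGetD pvDbm sm 0) (sd + n - 1) + 1) 1).map PySem.Int.toStr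
              = (pvCells sm sd true).take n.toNat := by
            unfold pvCells
            rw [if_pos hsd]
            obtain ⟨j, hj⟩ : ∃ j : Nat, n.toNat = j + 1 := ⟨n.toNat - 1, by omega⟩
            rw [hj, List.take_succ_cons, ← List.map_take, pvTake_pyRange]
            have : min (PySem.List.pyGetD pvDbm sm 0 + 1) (sd + 1 + (j : Int))
                = min (PySem.List.pyGetD pvDbm sm 0) (sd + n - 1) + 1 := by omega
            rw [this]
            simp
          rw [hcap] at hL ⊢
          rw [hL (by simp [List.length_take]; omega)]
          rw [pvTake_take_append]
          exact pvEmit_take n.toNat (12 - sm).toNat sm sd true hsm (le_refl _)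
        · have hguard : ¬ (0 < n ∧ sm ≤ 12 ∧ sd ≤ PySem.List.pyGetD pvDbm sm 0) := by
            intro h; exact hsd h.2.2
          rw [if_neg hguard] at hL ⊢
          rw [hL (by simp; omega), List.nil_append]
          have : pvCells sm sd true = [] := by unfold pvCells; rw [if_neg hsd]
          rw [show (pvTailG (12 - sm).toNat (sm + 1)).take n.toNat
              = (pvCells sm sd true ++ pvTailG (12 - sm).toNat (sm + 1)).take n.toNat from by
            rw [this, List.nil_append]]
          exact pvEmit_take n.toNat (12 - sm).toNat sm sd true hsm (le_refl _)
      · -- n = 0: both sides empty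
        have hn00 : n = 0 := by omega
        have hguard : ¬ (0 < n ∧ sm ≤ 12 ∧ sd ≤ PySem.List.pyGetD pvDbm sm 0) := by
          intro h; exact absurd h.1 hn1
        rw [if_neg hguard] at hL ⊢
        rw [hL (by simp; omega), hn00]
        simp [pvEmit]
    · -- sm > 12: loop runs zero fuel, stream empty
      have hguard : ¬ (0 < n ∧ sm ≤ 12 ∧ sd ≤ PySem.List.pyGetD pvDbm sm 0) := by
        intro h; exact hsm h.2.1
      rw [if_neg hguard]
      have hfz : (12 - sm).toNat = 0 := by omega
      rw [hfz]
      simp only [pvMonthLoopB]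
      rw [pvEmit_gt12 _ _ _ _ (by omega)]
  unfold solution solution_alt
  rw [pvTotal_eq month date hm13]
  dsimp only
  set T := date + (PySem.List.slice pvDbm none (some (max month 0))).sum with hT
  set day := if PySem.Int.mod T 7 ≠ 0 then PySem.Int.mod T 7 else 7 with hday
  set md := if date - day ≥ 0 then (month, date - day + 1)
            else (month - 1, PySem.List.pyGetD pvDbm (month - 1) 0 - (day - date) + 1) with hmd
  have hsm : (if date - day ≥ 0 then month else month - 1) = md.1 := by
    rw [hmd]; split_ifs <;> rfl
  rw [hsm]
  have hsd : (if month = md.1 then date - day + 1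
      else PySem.List.pyGetD pvDbm md.1 0 - (day - date) + 1) = md.2 := by
    rw [hmd]; split_ifs with h1 h2 h3
    · rfl
    · exact absurd rfl h2
    · refine absurd ?_ (show ¬ month = month - 1 from by omega)
      simpa using h3
    · rfl
  rw [hsd]
  exact key md.1 md.2

-- ===== VERDICT (by name: the statement is the Claim_ definition above) =====
theorem solution_spec : Claim_equal_solution := by
  intro month date weeks _ hp
  unfold Spec_solution
  exact pv_main month date weeks hp
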